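-- pv_equiv track=rewrite | github.com/milobeckman/turf | code/metaoptimize.py | list_of_run_commands
-- ===== SOURCE A (Python) =====
-- def list_of_run_commands(hyperparameters, choices, run_command_so_far, identifier_so_far):
--
--     # base case: sub in the identifier and run
--     if len(hyperparameters) == 0:
--         run_command = run_command_so_far.replace("%I", identifier_so_far)
--         return [run_command]
--
--     # choose the hyperparameter to iterate over
--     my_hp = hyperparameters[0]
--     identifier_index = 0
--     run_command_so_far += " --" + my_hp + " "
--
--     command_list = []
--
--     # call grid_search for each choice of hyperparameter
--     for choice in choices[my_hp]:
--         command_list += list_of_run_commands(hyperparameters[1:], choices, run_command_so_far + str(choice), identifier_so_far + str(identifier_index))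
--         identifier_index += 1
--
--     return command_list
-- ===== SOURCE B (Python) =====
-- def list_of_run_commands(hyperparameters, choices, run_command_so_far, identifier_so_far):
--     # Iterative cartesian product: combos holds (arg-string suffix, identifier suffix) pairs.
--     combos = [("", "")]
--     for hp in hyperparameters:
--         combos = [(args + " --" + hp + " " + str(choice), ident + str(i))
--                   for (args, ident) in combos
--                   for (i, choice) in enumerate(choices[hp])]
--     return [(run_command_so_far + args).replace("%I", identifier_so_far + ident)
--             for (args, ident) in combos]
-- ===== Notes on version B (the rewrite author's own statement) =====
-- stated objective: alternative
-- what changed: Replaced A's recursion over the hyperparameter list by an iterative fold that builds the cartesian product of (argument-suffix, identifier-suffix) pairs and maps one final %I-replace over it.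
-- outside the precondition, e.g. on list_of_run_commands(['a', 'b'], {'a': []}, 'x', ''): A returns [], B returns []
import Mathlib
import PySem

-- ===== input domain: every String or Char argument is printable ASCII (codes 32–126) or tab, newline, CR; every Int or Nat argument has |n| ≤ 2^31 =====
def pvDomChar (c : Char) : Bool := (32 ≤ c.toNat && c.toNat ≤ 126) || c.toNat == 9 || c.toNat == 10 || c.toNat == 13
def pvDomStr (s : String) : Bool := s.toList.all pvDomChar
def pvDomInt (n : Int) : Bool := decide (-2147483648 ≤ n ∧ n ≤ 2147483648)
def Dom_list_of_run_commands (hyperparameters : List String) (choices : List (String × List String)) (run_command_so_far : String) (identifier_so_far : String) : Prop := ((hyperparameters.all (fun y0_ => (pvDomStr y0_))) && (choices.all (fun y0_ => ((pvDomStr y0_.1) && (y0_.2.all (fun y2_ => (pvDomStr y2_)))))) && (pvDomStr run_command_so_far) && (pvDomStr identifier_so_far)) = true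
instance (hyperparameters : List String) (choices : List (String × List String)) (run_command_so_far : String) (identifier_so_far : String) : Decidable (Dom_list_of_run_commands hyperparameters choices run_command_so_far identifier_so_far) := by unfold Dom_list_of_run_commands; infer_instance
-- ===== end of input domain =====

-- ===== PORT A =====
-- B replaces A's recursion by an iterative product fold over the hyperparameters; objective: alternative decomposition (same cost).
-- shared dict-lookup helper: choices[hp] (Pre_ guarantees the key is present and keys are unique)
def pvChoicesOf (choices : List (String × List String)) (k : String) : List String :=
  ((choices.find? (fun p => p.1 == k)).map Prod.snd).getD []

def list_of_run_commands (hyperparameters : List String) (choices : List (String × List String)) (run_command_so_far : String) (identifier_so_far : String) : List String :=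
  match hyperparameters with
  | [] => [PySem.Str.replace run_command_so_far "%I" identifier_so_far]
  | my_hp :: rest =>
    let run_command_so_far' := run_command_so_far ++ " --" ++ my_hp ++ " "
    ((pvChoicesOf choices my_hp).foldl
      (fun st choice =>
        (st.1 ++ list_of_run_commands rest choices (run_command_so_far' ++ choice)
                   (identifier_so_far ++ PySem.Int.toStr st.2),
         st.2 + 1))
      (([] : List String), (0 : Int))).1

-- ===== PORT B =====
def list_of_run_commands_alt (hyperparameters : List String) (choices : List (String × List String)) (run_command_so_far : String) (identifier_so_far : String) : List String :=
  let combos := hyperparameters.foldl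
    (fun combos hp =>
      combos.flatMap (fun p =>
        (PySem.List.enumerate (pvChoicesOf choices hp) 0).map
          (fun iv => (p.1 ++ " --" ++ hp ++ " " ++ iv.2, p.2 ++ PySem.Int.toStr iv.1))))
    [(("" : String), ("" : String))]
  combos.map (fun p =>
    PySem.Str.replace (run_command_so_far ++ p.1) "%I" (identifier_so_far ++ p.2))

-- ===== PRECONDITION & SPEC =====
-- Pre_ excludes choices whose key list has duplicates (the Python dict keeps the last value, an accident of
-- dict construction order) and inputs where some hyperparameter has no entry in choices, on which both A and B
-- raise KeyError when that hyperparameter is reached; it is slightly wider than the raising set (a hyperparameter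
-- after one with an empty choice list is never looked up, so A returns [] there), by design: it states the
-- function's natural domain.
def Pre_list_of_run_commands (hyperparameters : List String) (choices : List (String × List String)) (run_command_so_far : String) (identifier_so_far : String) : Prop :=
  (choices.map Prod.fst).Nodup ∧ ∀ hp ∈ hyperparameters, hp ∈ choices.map Prod.fst
instance (hyperparameters : List String) (choices : List (String × List String)) (run_command_so_far : String) (identifier_so_far : String) : Decidable (Pre_list_of_run_commands hyperparameters choices run_command_so_far identifier_so_far) := by unfold Pre_list_of_run_commands; infer_instance

def pvWitness_list_of_run_commands : List String × (List (String × List String)) × String × String :=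
  (["lr", "bs"], [("lr", ["0.1", "0.01"]), ("bs", ["32"])], "run.sh %I", "v")

def Spec_list_of_run_commands (hyperparameters : List String) (choices : List (String × List String)) (run_command_so_far : String) (identifier_so_far : String) (out : List String) : Prop := out = list_of_run_commands_alt hyperparameters choices run_command_so_far identifier_so_far
instance (hyperparameters : List String) (choices : List (String × List String)) (run_command_so_far : String) (identifier_so_far : String) (out : List String) : Decidable (Spec_list_of_run_commands hyperparameters choices run_command_so_far identifier_so_far out) := by unfold Spec_list_of_run_commands; infer_instance

-- ===== CLAIM (what is proved, stated in full; the proofs are below) =====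
def Claim_equal_list_of_run_commands : Prop := ∀ (hyperparameters : List String) (choices : List (String × List String)) (run_command_so_far : String) (identifier_so_far : String), Dom_list_of_run_commands hyperparameters choices run_command_so_far identifier_so_far → Pre_list_of_run_commands hyperparameters choices run_command_so_far identifier_so_far → Spec_list_of_run_commands hyperparameters choices run_command_so_far identifier_so_far (list_of_run_commands hyperparameters choices run_command_so_far identifier_so_far)

-- ===== LEMMAS AND PROOFS =====

-- one step of B's product fold
def pvStep (choices : List (String × List String)) (combos : List (String × String)) (hp : String) : List (String × String) :=
  combos.flatMap (fun p =>
    (PySem.List.enumerate (pvChoicesOf choices hp) 0).map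
      (fun iv => (p.1 ++ " --" ++ hp ++ " " ++ iv.2, p.2 ++ PySem.Int.toStr iv.1)))

-- B's fold from an arbitrary seed = seed spliced with the fold from the unit seed
theorem pvStep_foldl_seed (choices : List (String × List String)) (hps : List String) (S : List (String × String)) :
    hps.foldl (pvStep choices) S =
      S.flatMap (fun p => (hps.foldl (pvStep choices) [("", "")]).map
        (fun q => (p.1 ++ q.1, p.2 ++ q.2))) := by
  induction hps generalizing S with
  | nil =>
    simp only [List.foldl_nil]
    simp only [List.flatMap]
    induction S with
    | nil => rfl
    | cons a t ih => simpa using ih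
  | cons hp rest ih =>
    simp only [List.foldl_cons]
    rw [ih (pvStep choices S hp), ih (pvStep choices [("", "")] hp)]
    simp only [pvStep, List.flatMap_assoc, List.flatMap_singleton, List.map_flatMap,
      List.flatMap_map, List.map_map]
    apply List.flatMap_congr
    intro p _
    apply List.flatMap_congr
    intro iv _
    simp [Function.comp, String.append_assoc]

-- A's counting fold = flatMap over enumerate
theorem pvFoldl_counter (g : String → Int → List String) (l : List String) (acc : List String) (n : Int) :
    (l.foldl (fun st choice => (st.1 ++ g choice st.2, st.2 + 1)) (acc, n)).1 =
      acc ++ (PySem.List.enumerate l n).flatMap (fun iv => g iv.2 iv.1) := by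
  induction l generalizing acc n with
  | nil => simp [PySem.List.enumerate]
  | cons c t ih => simp [PySem.List.enumerate_cons, ih]

-- main bridge: A's recursion computes B's map over the product
theorem pvA_eq_map (choices : List (String × List String)) (hps : List String) (cmd ident : String) :
    list_of_run_commands hps choices cmd ident =
      (hps.foldl (pvStep choices) [("", "")]).map
        (fun q => PySem.Str.replace (cmd ++ q.1) "%I" (ident ++ q.2)) := by
  induction hps generalizing cmd ident with
  | nil => simp [list_of_run_commands]
  | cons hp rest ih =>
    show ((pvChoicesOf choices hp).foldl _ (([] : List String), (0 : Int))).1 = _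
    rw [pvFoldl_counter (g := fun choice n =>
      list_of_run_commands rest choices ((cmd ++ " --" ++ hp ++ " ") ++ choice) (ident ++ PySem.Int.toStr n))]
    simp only [List.nil_append]
    rw [List.foldl_cons, pvStep_foldl_seed choices rest (pvStep choices [("", "")] hp)]
    simp only [pvStep, List.flatMap_singleton, List.map_flatMap, List.flatMap_map, List.map_map]
    apply List.flatMap_congr
    intro iv _
    rw [ih]
    apply List.map_congr_left
    intro q _
    simp [Function.comp, String.append_assoc]

-- ===== VERDICT (by name: the statement is the Claim_ definition above) =====
theorem list_of_run_commands_spec : Claim_equal_list_of_run_commands := by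
  intro hps choices cmd ident _ _
  unfold Spec_list_of_run_commands list_of_run_commands_alt
  exact pvA_eq_map choices hps cmd ident
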